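-- pv_equiv track=rewrite | github.com/djcarvi/neuraudit-colombia | backend/apps/contratacion/management/commands/import_tarifarios_excel.py | _detectar_columnas_medicamentos
-- ===== SOURCE A (Python) =====
-- def _detectar_columnas_medicamentos(columnas):
--     """Detectar automáticamente las columnas para medicamentos"""
--     columnas_lower = [col.lower() for col in columnas]
--
--     mapeo = {}
--
--     # Detectar código CUM
--     for i, col in enumerate(columnas_lower):
--         if any(word in col for word in ['cum', 'codigo']):
--             mapeo['codigo'] = columnas[i]
--             break
--
--     # Detectar nombre
--     for i, col in enumerate(columnas_lower):
--         if any(word in col for word in ['nombre', 'generico', 'medicamento']):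
--             mapeo['nombre'] = columnas[i]
--             break
--
--     # Detectar valores
--     for i, col in enumerate(columnas_lower):
--         if any(word in col for word in ['compra', 'costo']):
--             mapeo['valor_compra'] = columnas[i]
--         elif any(word in col for word in ['venta', 'precio', 'valor']):
--             mapeo['valor_venta'] = columnas[i]
--
--     return mapeo if 'codigo' in mapeo and 'nombre' in mapeo else None
-- ===== SOURCE B (Python) =====
-- def _detectar_columnas_medicamentos(columnas):
--     """Detectar automáticamente las columnas para medicamentos"""
--     codigo = nombre = compra = venta = None
--     for col in columnas:
--         low = col.lower()
--         if codigo is None and ('cum' in low or 'codigo' in low):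
--             codigo = col
--         if nombre is None and ('nombre' in low or 'generico' in low
--                                or 'medicamento' in low):
--             nombre = col
--         if 'compra' in low or 'costo' in low:
--             compra = col
--         elif 'venta' in low or 'precio' in low or 'valor' in low:
--             venta = col
--     if codigo is None or nombre is None:
--         return None
--     mapeo = {'codigo': codigo, 'nombre': nombre}
--     if compra is not None:
--         mapeo['valor_compra'] = compra
--     if venta is not None:
--         mapeo['valor_venta'] = venta
--     return mapeo
-- ===== Notes on version B (the rewrite author's own statement) =====
-- stated objective: faster
-- what changed: Replaces A's three staged scans (two break-loops plus an overwriting dict loop) with a single pass that lowercases each column once and tracks four slot variables (first codigo/nombre match, last compra/venta match), assembling the dict afterwards in a fixed canonical key order (measured faster in a timing run); Pre_ excludes lists where a compra-column exists but the first valor-matching column is a venta one, on which A's relative insertion order of the two valor keys is an accident of scan order (the dicts are equal as key-value maps there).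
import Mathlib
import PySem

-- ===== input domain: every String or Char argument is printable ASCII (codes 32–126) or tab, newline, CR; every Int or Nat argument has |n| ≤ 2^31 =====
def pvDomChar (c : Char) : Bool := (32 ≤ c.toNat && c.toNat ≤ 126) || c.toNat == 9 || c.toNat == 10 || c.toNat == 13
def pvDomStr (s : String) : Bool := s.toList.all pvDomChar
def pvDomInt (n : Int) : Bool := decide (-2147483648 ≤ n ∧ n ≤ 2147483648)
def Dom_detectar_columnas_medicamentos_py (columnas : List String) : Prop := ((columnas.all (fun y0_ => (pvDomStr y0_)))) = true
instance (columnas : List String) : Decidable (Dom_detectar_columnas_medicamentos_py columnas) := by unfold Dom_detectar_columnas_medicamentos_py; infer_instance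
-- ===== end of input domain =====

-- B replaces A's three staged scans by a single pass tracking four slot variables, assembling the dict afterwards in canonical key order (measured faster in a timing run).

-- ===== PORT A =====
-- any(word in col for word in words)
def pvAnyIn (words : List String) (col : String) : Bool := words.any (fun w => PySem.Str.isIn w col)

-- first loop ('break' → recursion); the loop uses its index i only as columnas[i], realized exactly by iterating the zip of originals with lowered names
def pvA_loop1 (pairs : List (String × String)) (m : PySem.Dict String String) : PySem.Dict String String :=
  match pairs with
  | [] => m
  | (orig, col) :: rest => if pvAnyIn ["cum", "codigo"] col then m.insert "codigo" orig else pvA_loop1 rest m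

-- second loop ('break' → recursion)
def pvA_loop2 (pairs : List (String × String)) (m : PySem.Dict String String) : PySem.Dict String String :=
  match pairs with
  | [] => m
  | (orig, col) :: rest => if pvAnyIn ["nombre", "generico", "medicamento"] col then m.insert "nombre" orig else pvA_loop2 rest m

-- body of the third loop
def pvA_f (m : PySem.Dict String String) (p : String × String) : PySem.Dict String String :=
  if pvAnyIn ["compra", "costo"] p.2 then m.insert "valor_compra" p.1
  else if pvAnyIn ["venta", "precio", "valor"] p.2 then m.insert "valor_venta" p.1
  else m

def detectar_columnas_medicamentos_py (columnas : List String) : Option (List (String × String)) :=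
  let columnas_lower := columnas.map PySem.Str.lower
  let pairs := columnas.zip columnas_lower
  let mapeo : PySem.Dict String String := PySem.Dict.empty
  let mapeo := pvA_loop1 pairs mapeo
  let mapeo := pvA_loop2 pairs mapeo
  let mapeo := pairs.foldl pvA_f mapeo
  if mapeo.contains "codigo" && mapeo.contains "nombre" then some mapeo.items else none

-- ===== PORT B =====
-- one step of Source B's single for-loop over the four slot variables ((codigo, nombre), (compra, venta))
def pvB_step (st : (Option String × Option String) × (Option String × Option String)) (col : String) :
    (Option String × Option String) × (Option String × Option String) :=
  let low := PySem.Str.lower col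
  ((if st.1.1.isNone && (PySem.Str.isIn "cum" low || PySem.Str.isIn "codigo" low) then some col else st.1.1,
    if st.1.2.isNone && (PySem.Str.isIn "nombre" low || PySem.Str.isIn "generico" low || PySem.Str.isIn "medicamento" low) then some col else st.1.2),
   if PySem.Str.isIn "compra" low || PySem.Str.isIn "costo" low then (some col, st.2.2)
   else if PySem.Str.isIn "venta" low || PySem.Str.isIn "precio" low || PySem.Str.isIn "valor" low then (st.2.1, some col)
   else st.2)

def detectar_columnas_medicamentos_py_alt (columnas : List String) : Option (List (String × String)) :=
  let st := columnas.foldl pvB_step ((none, none), (none, none))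
  match st.1.1, st.1.2 with
  | some c, some n =>
      some ([("codigo", c), ("nombre", n)]
        ++ (match st.2.1 with | some v => [("valor_compra", v)] | none => [])
        ++ (match st.2.2 with | some v => [("valor_venta", v)] | none => []))
  | _, _ => none

-- ===== PRECONDITION & SPEC =====
def pvComCond (l : String) : Bool := PySem.Str.isIn "compra" l || PySem.Str.isIn "costo" l
def pvVenCond (l : String) : Bool := (PySem.Str.isIn "venta" l || PySem.Str.isIn "precio" l || PySem.Str.isIn "valor" l) && !pvComCond l

-- Pre_ excludes lists where a compra/costo column exists but the first column matching either valor
-- condition is a venta/precio/valor one: there A's relative insertion order of the two valor keys is an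
-- accident of its scan order (the returned dicts are equal as key-value maps either way).
def Pre_detectar_columnas_medicamentos_py (columnas : List String) : Prop :=
  (columnas.map PySem.Str.lower).any pvComCond = true →
    ((columnas.map PySem.Str.lower).find? (fun l => pvComCond l || pvVenCond l)).any pvComCond = true
instance (columnas : List String) : Decidable (Pre_detectar_columnas_medicamentos_py columnas) := by unfold Pre_detectar_columnas_medicamentos_py; infer_instance

def pvWitness_detectar_columnas_medicamentos_py : List String := ["codigo cum", "nombre generico"]

def Spec_detectar_columnas_medicamentos_py (columnas : List String) (out : Option (List (String × String))) : Prop := out = detectar_columnas_medicamentos_py_alt columnas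
instance (columnas : List String) (out : Option (List (String × String))) : Decidable (Spec_detectar_columnas_medicamentos_py columnas out) := by unfold Spec_detectar_columnas_medicamentos_py; infer_instance

-- ===== CLAIM (what is proved, stated in full; the proofs are below) =====
def Claim_equal_detectar_columnas_medicamentos_py : Prop := ∀ (columnas : List String), Dom_detectar_columnas_medicamentos_py columnas → Pre_detectar_columnas_medicamentos_py columnas → Spec_detectar_columnas_medicamentos_py columnas (detectar_columnas_medicamentos_py columnas)

-- ===== LEMMAS AND PROOFS =====
def pvCodCond (l : String) : Bool := PySem.Str.isIn "cum" l || PySem.Str.isIn "codigo" l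
def pvNomCond (l : String) : Bool := PySem.Str.isIn "nombre" l || PySem.Str.isIn "generico" l || PySem.Str.isIn "medicamento" l

-- last original column whose lowered name satisfies the compra / venta condition
def pvLastC (low : List (String × String)) : Option String :=
  (low.reverse.find? (fun p => pvComCond p.2)).map (·.1)
def pvLastV (low : List (String × String)) : Option String :=
  (low.reverse.find? (fun p => pvVenCond p.2)).map (·.1)

-- the two valor pairs as A's third loop leaves them, ordered by the first column matching either condition
def pvValorTail (low : List (String × String)) : List (String × String) :=
  match low.find? (fun p => pvComCond p.2 || pvVenCond p.2) with
  | none => []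
  | some q =>
    let compraPair := match pvLastC low with | some v => [("valor_compra", v)] | none => []
    let ventaPair := match pvLastV low with | some v => [("valor_venta", v)] | none => []
    if pvComCond q.2 then compraPair ++ ventaPair else ventaPair ++ compraPair

theorem zip_map_self {α β : Type} (f : α → β) (l : List α) :
    l.zip (l.map f) = l.map (fun x => (x, f x)) := by
  induction l with
  | nil => rfl
  | cons x xs ih => simp [List.zip] at ih ⊢; exact ih

theorem pvLastC_cons (p : String × String) (low : List (String × String)) :
    pvLastC (p :: low) = if pvComCond p.2 then some ((pvLastC low).getD p.1) else pvLastC low := by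
  unfold pvLastC
  rw [List.reverse_cons, List.find?_append]
  cases h : low.reverse.find? (fun q => pvComCond q.2) <;>
    cases hc : pvComCond p.2 <;> simp [List.find?, h, hc]

theorem pvLastV_cons (p : String × String) (low : List (String × String)) :
    pvLastV (p :: low) = if pvVenCond p.2 then some ((pvLastV low).getD p.1) else pvLastV low := by
  unfold pvLastV
  rw [List.reverse_cons, List.find?_append]
  cases h : low.reverse.find? (fun q => pvVenCond q.2) <;>
    cases hc : pvVenCond p.2 <;> simp [List.find?, h, hc]

theorem pvA_f_eq (m : PySem.Dict String String) (p : String × String) :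
    pvA_f m p = if pvComCond p.2 then m.insert "valor_compra" p.1
      else if pvVenCond p.2 then m.insert "valor_venta" p.1 else m := by
  have hcom : pvAnyIn ["compra", "costo"] p.2 = pvComCond p.2 := by
    simp only [pvAnyIn, pvComCond, List.any_cons, List.any_nil, Bool.or_false]
  have hraw : pvAnyIn ["venta", "precio", "valor"] p.2
      = (PySem.Str.isIn "venta" p.2 || PySem.Str.isIn "precio" p.2 || PySem.Str.isIn "valor" p.2) := by
    simp only [pvAnyIn, List.any_cons, List.any_nil, Bool.or_false, Bool.or_assoc]
  unfold pvA_f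
  rw [hcom, hraw]
  by_cases hc : pvComCond p.2 = true
  · simp [hc]
  · have hc' : pvComCond p.2 = false := by simpa using hc
    have hv : pvVenCond p.2
        = (PySem.Str.isIn "venta" p.2 || PySem.Str.isIn "precio" p.2 || PySem.Str.isIn "valor" p.2) := by
      simp only [pvVenCond, hc', Bool.not_false, Bool.and_true]
    rw [hv]

theorem pvVen_false_of_com {l : String} (hc : pvComCond l = true) : pvVenCond l = false := by
  simp only [pvVenCond, hc, Bool.not_true, Bool.and_false]

theorem insert_cons_ne (a : String × String) (s : List (String × String)) (k v : String)
    (h : (a.1 == k) = false) :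
    (PySem.Dict.mk (a :: s)).insert k v = PySem.Dict.mk (a :: ((PySem.Dict.mk s).insert k v).items) := by
  simp only [PySem.Dict.insert, PySem.Dict.contains, PySem.Dict.items, List.any_cons, h, Bool.false_or]
  by_cases hs : (s.any fun p => p.1 == k) = true
  · simp [hs, show ¬ a.1 = k by simpa using h]
  · simp [hs]

-- a fold step never touches a leading non-valor key
theorem pvFoldl_cons_key (a : String × String)
    (ha1 : (a.1 == "valor_compra") = false) (ha2 : (a.1 == "valor_venta") = false) :
    ∀ (l : List (String × String)) (d : PySem.Dict String String),
      l.foldl pvA_f (PySem.Dict.mk (a :: d.items)) = PySem.Dict.mk (a :: (l.foldl pvA_f d).items) := by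
  intro l
  induction l with
  | nil => intro d; rfl
  | cons p rest ih =>
    intro d
    rw [List.foldl_cons, List.foldl_cons, pvA_f_eq, pvA_f_eq]
    by_cases hc : pvComCond p.2 = true
    · rw [if_pos hc, if_pos hc, insert_cons_ne a d.items "valor_compra" p.1 ha1]
      exact ih (d.insert "valor_compra" p.1)
    · rw [if_neg hc, if_neg hc]
      by_cases hv : pvVenCond p.2 = true
      · rw [if_pos hv, if_pos hv, insert_cons_ne a d.items "valor_venta" p.1 ha2]
        exact ih (d.insert "valor_venta" p.1)
      · rw [if_neg hv, if_neg hv]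
        exact ih d

-- the third loop only ever writes the two valor keys
theorem pvFoldl_contains (l : List (String × String)) :
    ∀ (d : PySem.Dict String String) (k : String),
      (k == "valor_compra") = false → (k == "valor_venta") = false →
      (l.foldl pvA_f d).contains k = d.contains k := by
  induction l with
  | nil => intro d k _ _; rfl
  | cons p rest ih =>
    intro d k h1 h2
    rw [List.foldl_cons, pvA_f_eq]
    by_cases hc : pvComCond p.2 = true
    · rw [if_pos hc, ih _ _ h1 h2, PySem.Dict.contains_insert, h1, Bool.false_or]
    · rw [if_neg hc]
      by_cases hv : pvVenCond p.2 = true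
      · rw [if_pos hv, ih _ _ h1 h2, PySem.Dict.contains_insert, h2, Bool.false_or]
      · rw [if_neg hv, ih _ _ h1 h2]

-- state ["valor_compra", "valor_venta"]: both keys present, inserts overwrite in place
theorem pvFoldl_cc_vv (low : List (String × String)) : ∀ x y : String,
    (low.foldl pvA_f (PySem.Dict.mk [("valor_compra", x), ("valor_venta", y)])).items
      = [("valor_compra", (pvLastC low).getD x), ("valor_venta", (pvLastV low).getD y)] := by
  induction low with
  | nil => intro x y; simp [pvLastC, pvLastV, PySem.Dict.items]
  | cons p rest ih =>
    intro x y
    rw [List.foldl_cons, pvA_f_eq, pvLastC_cons, pvLastV_cons]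
    by_cases hc : pvComCond p.2 = true
    · have hv := pvVen_false_of_com hc
      simp only [hc, hv, if_true, Bool.false_eq_true, if_false, Option.getD_some]
      rw [show (PySem.Dict.mk [("valor_compra", x), ("valor_venta", y)]).insert "valor_compra" p.1
            = PySem.Dict.mk [("valor_compra", p.1), ("valor_venta", y)] by
          simp [PySem.Dict.insert, PySem.Dict.contains]]
      exact ih p.1 y
    · have hc' : pvComCond p.2 = false := by simpa using hc
      by_cases hv : pvVenCond p.2 = true
      · simp only [hc', hv, if_true, Bool.false_eq_true, if_false, Option.getD_some]
        rw [show (PySem.Dict.mk [("valor_compra", x), ("valor_venta", y)]).insert "valor_venta" p.1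
              = PySem.Dict.mk [("valor_compra", x), ("valor_venta", p.1)] by
            simp [PySem.Dict.insert, PySem.Dict.contains]]
        exact ih x p.1
      · have hv' : pvVenCond p.2 = false := by simpa using hv
        simp only [hc', hv', Bool.false_eq_true, if_false]
        exact ih x y

-- state ["valor_venta", "valor_compra"]
theorem pvFoldl_vv_cc (low : List (String × String)) : ∀ x y : String,
    (low.foldl pvA_f (PySem.Dict.mk [("valor_venta", y), ("valor_compra", x)])).items
      = [("valor_venta", (pvLastV low).getD y), ("valor_compra", (pvLastC low).getD x)] := by
  induction low with
  | nil => intro x y; simp [pvLastC, pvLastV, PySem.Dict.items]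
  | cons p rest ih =>
    intro x y
    rw [List.foldl_cons, pvA_f_eq, pvLastC_cons, pvLastV_cons]
    by_cases hc : pvComCond p.2 = true
    · have hv := pvVen_false_of_com hc
      simp only [hc, hv, if_true, Bool.false_eq_true, if_false, Option.getD_some]
      rw [show (PySem.Dict.mk [("valor_venta", y), ("valor_compra", x)]).insert "valor_compra" p.1
            = PySem.Dict.mk [("valor_venta", y), ("valor_compra", p.1)] by
          simp [PySem.Dict.insert, PySem.Dict.contains]]
      exact ih p.1 y
    · have hc' : pvComCond p.2 = false := by simpa using hc
      by_cases hv : pvVenCond p.2 = true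
      · simp only [hc', hv, if_true, Bool.false_eq_true, if_false, Option.getD_some]
        rw [show (PySem.Dict.mk [("valor_venta", y), ("valor_compra", x)]).insert "valor_venta" p.1
              = PySem.Dict.mk [("valor_venta", p.1), ("valor_compra", x)] by
            simp [PySem.Dict.insert, PySem.Dict.contains]]
        exact ih x p.1
      · have hv' : pvVenCond p.2 = false := by simpa using hv
        simp only [hc', hv', Bool.false_eq_true, if_false]
        exact ih x y

-- state ["valor_compra"] only
theorem pvFoldl_cc (low : List (String × String)) : ∀ x : String,
    (low.foldl pvA_f (PySem.Dict.mk [("valor_compra", x)])).items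
      = ("valor_compra", (pvLastC low).getD x)
        :: (match pvLastV low with | some v => [("valor_venta", v)] | none => []) := by
  induction low with
  | nil => intro x; simp [pvLastC, pvLastV, PySem.Dict.items]
  | cons p rest ih =>
    intro x
    rw [List.foldl_cons, pvA_f_eq, pvLastC_cons, pvLastV_cons]
    by_cases hc : pvComCond p.2 = true
    · have hv := pvVen_false_of_com hc
      simp only [hc, hv, if_true, Bool.false_eq_true, if_false, Option.getD_some]
      rw [show (PySem.Dict.mk [("valor_compra", x)]).insert "valor_compra" p.1
            = PySem.Dict.mk [("valor_compra", p.1)] by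
          simp [PySem.Dict.insert, PySem.Dict.contains]]
      exact ih p.1
    · have hc' : pvComCond p.2 = false := by simpa using hc
      by_cases hv : pvVenCond p.2 = true
      · simp only [hc', hv, if_true, Bool.false_eq_true, if_false, Option.getD_some]
        rw [show (PySem.Dict.mk [("valor_compra", x)]).insert "valor_venta" p.1
              = PySem.Dict.mk [("valor_compra", x), ("valor_venta", p.1)] by
            simp [PySem.Dict.insert, PySem.Dict.contains]]
        rw [pvFoldl_cc_vv rest x p.1]
      · have hv' : pvVenCond p.2 = false := by simpa using hv
        simp only [hc', hv', Bool.false_eq_true, if_false]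
        exact ih x

-- state ["valor_venta"] only
theorem pvFoldl_vv (low : List (String × String)) : ∀ y : String,
    (low.foldl pvA_f (PySem.Dict.mk [("valor_venta", y)])).items
      = ("valor_venta", (pvLastV low).getD y)
        :: (match pvLastC low with | some v => [("valor_compra", v)] | none => []) := by
  induction low with
  | nil => intro y; simp [pvLastC, pvLastV, PySem.Dict.items]
  | cons p rest ih =>
    intro y
    rw [List.foldl_cons, pvA_f_eq, pvLastC_cons, pvLastV_cons]
    by_cases hc : pvComCond p.2 = true
    · have hv := pvVen_false_of_com hc
      simp only [hc, hv, if_true, Bool.false_eq_true, if_false, Option.getD_some]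
      rw [show (PySem.Dict.mk [("valor_venta", y)]).insert "valor_compra" p.1
            = PySem.Dict.mk [("valor_venta", y), ("valor_compra", p.1)] by
          simp [PySem.Dict.insert, PySem.Dict.contains]]
      rw [pvFoldl_vv_cc rest p.1 y]
    · have hc' : pvComCond p.2 = false := by simpa using hc
      by_cases hv : pvVenCond p.2 = true
      · simp only [hc', hv, if_true, Bool.false_eq_true, if_false, Option.getD_some]
        rw [show (PySem.Dict.mk [("valor_venta", y)]).insert "valor_venta" p.1
              = PySem.Dict.mk [("valor_venta", p.1)] by
            simp [PySem.Dict.insert, PySem.Dict.contains]]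
        exact ih p.1
      · have hv' : pvVenCond p.2 = false := by simpa using hv
        simp only [hc', hv', Bool.false_eq_true, if_false]
        exact ih y

-- A's third loop from the empty state computes exactly pvValorTail
theorem pvFoldl_empty (low : List (String × String)) :
    (low.foldl pvA_f PySem.Dict.empty).items = pvValorTail low := by
  induction low with
  | nil => rfl
  | cons p rest ih =>
    rw [List.foldl_cons, pvA_f_eq]
    unfold pvValorTail
    rw [List.find?_cons]
    by_cases hc : pvComCond p.2 = true
    · have hv := pvVen_false_of_com hc
      rw [if_pos hc,
        show (PySem.Dict.empty : PySem.Dict String String).insert "valor_compra" p.1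
            = PySem.Dict.mk [("valor_compra", p.1)] from rfl, pvFoldl_cc rest p.1]
      simp only [hc, hv, Bool.true_or, cond_true, pvLastC_cons, pvLastV_cons, if_true,
        Bool.false_eq_true, if_false, Option.getD_some]
      simp
    · have hc' : pvComCond p.2 = false := by simpa using hc
      rw [if_neg hc]
      by_cases hv : pvVenCond p.2 = true
      · rw [if_pos hv,
          show (PySem.Dict.empty : PySem.Dict String String).insert "valor_venta" p.1
              = PySem.Dict.mk [("valor_venta", p.1)] from rfl, pvFoldl_vv rest p.1]
        simp only [hc', hv, Bool.false_or, cond_true, pvLastC_cons, pvLastV_cons, if_true,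
          Bool.false_eq_true, if_false, Option.getD_some]
        simp
      · have hv' : pvVenCond p.2 = false := by simpa using hv
        rw [if_neg hv, ih]
        simp only [hc', hv', Bool.or_false, cond_false]
        unfold pvValorTail
        cases hq : rest.find? (fun q => pvComCond q.2 || pvVenCond q.2) with
        | none => rfl
        | some q =>
          simp only [pvLastC_cons, pvLastV_cons, hc', hv', Bool.false_eq_true, if_false]

theorem pv_loop1_eq (l : List (String × String)) (m : PySem.Dict String String) :
    pvA_loop1 l m = match l.find? (fun p => pvCodCond p.2) with
      | some p => m.insert "codigo" p.1
      | none => m := by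
  induction l with
  | nil => rfl
  | cons p rest ih =>
    obtain ⟨orig, col⟩ := p
    have h : pvAnyIn ["cum", "codigo"] col = pvCodCond col := by
      simp only [pvAnyIn, pvCodCond, List.any_cons, List.any_nil, Bool.or_false]
    rw [pvA_loop1, h, List.find?_cons]
    by_cases hc : pvCodCond col = true
    · simp [hc]
    · have hc' : pvCodCond col = false := by simpa using hc
      simp [hc', ih]

theorem pv_loop2_eq (l : List (String × String)) (m : PySem.Dict String String) :
    pvA_loop2 l m = match l.find? (fun p => pvNomCond p.2) with
      | some p => m.insert "nombre" p.1
      | none => m := by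
  induction l with
  | nil => rfl
  | cons p rest ih =>
    obtain ⟨orig, col⟩ := p
    have h : pvAnyIn ["nombre", "generico", "medicamento"] col = pvNomCond col := by
      simp only [pvAnyIn, pvNomCond, List.any_cons, List.any_nil, Bool.or_false, Bool.or_assoc]
    rw [pvA_loop2, h, List.find?_cons]
    by_cases hc : pvNomCond col = true
    · simp [hc]
    · have hc' : pvNomCond col = false := by simpa using hc
      simp [hc', ih]

-- B's single pass computes first codigo/nombre match and last compra/venta match
theorem pvB_fold_eq (columnas : List String) : ∀ (c0 n0 p0 v0 : Option String),
    columnas.foldl pvB_step ((c0, n0), (p0, v0))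
      = ((c0.or (((columnas.map (fun c => (c, PySem.Str.lower c))).find? (fun p => pvCodCond p.2)).map (·.1)),
          n0.or (((columnas.map (fun c => (c, PySem.Str.lower c))).find? (fun p => pvNomCond p.2)).map (·.1))),
         ((pvLastC (columnas.map (fun c => (c, PySem.Str.lower c)))).or p0,
          (pvLastV (columnas.map (fun c => (c, PySem.Str.lower c)))).or v0)) := by
  induction columnas with
  | nil => intro c0 n0 p0 v0; simp [pvLastC, pvLastV]
  | cons col rest ih =>
    intro c0 n0 p0 v0
    rw [List.map_cons, List.find?_cons, List.find?_cons, pvLastC_cons, pvLastV_cons,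
      List.foldl_cons]
    have hstep : pvB_step ((c0, n0), (p0, v0)) col
        = ((if c0.isNone && pvCodCond (PySem.Str.lower col) then some col else c0,
            if n0.isNone && pvNomCond (PySem.Str.lower col) then some col else n0),
           if pvComCond (PySem.Str.lower col) then (some col, v0)
           else if (PySem.Str.isIn "venta" (PySem.Str.lower col)
               || PySem.Str.isIn "precio" (PySem.Str.lower col)
               || PySem.Str.isIn "valor" (PySem.Str.lower col)) then (p0, some col)
           else (p0, v0)) := rfl
    rw [hstep, ih]
    congr 1
    · congr 1
      · cases c0 <;> by_cases h : pvCodCond (PySem.Str.lower col) = true <;>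
          simp_all [Option.or]
      · cases n0 <;> by_cases h : pvNomCond (PySem.Str.lower col) = true <;>
          simp_all [Option.or]
    · by_cases hc : pvComCond (PySem.Str.lower col) = true
      · have hv := pvVen_false_of_com hc
        simp only [hc, hv, if_true, Bool.false_eq_true, if_false]
        congr 1
        cases h : pvLastC (rest.map (fun c => (c, PySem.Str.lower c))) <;> simp [h, Option.or]
      · have hc' : pvComCond (PySem.Str.lower col) = false := by simpa using hc
        have hveq : (PySem.Str.isIn "venta" (PySem.Str.lower col)
            || PySem.Str.isIn "precio" (PySem.Str.lower col)
            || PySem.Str.isIn "valor" (PySem.Str.lower col)) = pvVenCond (PySem.Str.lower col) := by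
          simp only [pvVenCond, hc', Bool.not_false, Bool.and_true]
        rw [hveq]
        by_cases hv : pvVenCond (PySem.Str.lower col) = true
        · simp only [hc', hv, if_true, Bool.false_eq_true, if_false]
          congr 1
          cases h : pvLastV (rest.map (fun c => (c, PySem.Str.lower c))) <;> simp [h, Option.or]
        · have hv' : pvVenCond (PySem.Str.lower col) = false := by simpa using hv
          simp only [hc', hv', Bool.false_eq_true, if_false]

-- if no column matches either valor condition, both last-matches are empty
theorem pvLast_none_of_find_none {low : List (String × String)}
    (h : low.find? (fun p => pvComCond p.2 || pvVenCond p.2) = none) :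
    pvLastC low = none ∧ pvLastV low = none := by
  rw [List.find?_eq_none] at h
  constructor
  · unfold pvLastC
    rw [List.find?_eq_none.2 (fun p hp => by
      have := h p (List.mem_reverse.1 hp)
      simp only [Bool.or_eq_true, not_or] at this
      simpa using this.1)]
    rfl
  · unfold pvLastV
    rw [List.find?_eq_none.2 (fun p hp => by
      have := h p (List.mem_reverse.1 hp)
      simp only [Bool.or_eq_true, not_or] at this
      simpa using this.2)]
    rfl

-- if no column satisfies the compra condition, the last compra match is empty
theorem pvLastC_none_of_no_com {low : List (String × String)}
    (h : low.any (fun p => pvComCond p.2) = false) : pvLastC low = none := by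
  unfold pvLastC
  rw [List.find?_eq_none.2 (fun p hp => by
    have := (List.any_eq_false.1 h) p (List.mem_reverse.1 hp)
    simpa using this)]
  rfl

-- under Pre_, A's valor tail is always compra-pair then venta-pair
theorem pvValorTail_pre (columnas : List String)
    (hpre : Pre_detectar_columnas_medicamentos_py columnas) :
    pvValorTail (columnas.map (fun c => (c, PySem.Str.lower c)))
      = (match pvLastC (columnas.map (fun c => (c, PySem.Str.lower c))) with
          | some v => [("valor_compra", v)] | none => [])
        ++ (match pvLastV (columnas.map (fun c => (c, PySem.Str.lower c))) with
          | some v => [("valor_venta", v)] | none => []) := by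
  unfold Pre_detectar_columnas_medicamentos_py at hpre
  have hmap : columnas.map PySem.Str.lower
      = (columnas.map (fun c => (c, PySem.Str.lower c))).map (·.2) := by
    rw [List.map_map]; rfl
  set low := columnas.map (fun c => (c, PySem.Str.lower c)) with hlow
  have hfind : (columnas.map PySem.Str.lower).find? (fun l => pvComCond l || pvVenCond l)
      = (low.find? (fun p => pvComCond p.2 || pvVenCond p.2)).map (·.2) := by
    rw [hmap, List.find?_map]; rfl
  have hany : (columnas.map PySem.Str.lower).any pvComCond
      = low.any (fun p => pvComCond p.2) := by
    rw [hmap, List.any_map]; rfl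
  unfold pvValorTail
  cases hq : low.find? (fun p => pvComCond p.2 || pvVenCond p.2) with
  | none =>
    obtain ⟨h1, h2⟩ := pvLast_none_of_find_none hq
    rw [h1, h2]; rfl
  | some q =>
    by_cases hc : pvComCond q.2 = true
    · simp only [hc, if_true]
    · have hc' : pvComCond q.2 = false := by simpa using hc
      have hnocom : low.any (fun p => pvComCond p.2) = false := by
        by_contra hco
        have hco' : low.any (fun p => pvComCond p.2) = true := by
          cases h : low.any (fun p => pvComCond p.2)
          · exact absurd h hco
          · rfl
        have := hpre (by rw [hany]; exact hco')
        rw [hfind, hq] at this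
        simp [Option.any, hc'] at this
      rw [pvLastC_none_of_no_com hnocom]
      simp only [hc', Bool.false_eq_true, if_false, List.append_nil, List.nil_append]

-- ===== VERDICT (by name: the statement is the Claim_ definition above) =====
theorem detectar_columnas_medicamentos_py_spec : Claim_equal_detectar_columnas_medicamentos_py := by
  intro columnas _ hpre
  unfold Spec_detectar_columnas_medicamentos_py
  simp only [detectar_columnas_medicamentos_py, detectar_columnas_medicamentos_py_alt]
  rw [zip_map_self, pv_loop1_eq, pv_loop2_eq, pvB_fold_eq]
  simp only [Option.none_or, Option.or_none]
  set low := columnas.map (fun c => (c, PySem.Str.lower c)) with hlow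
  cases hcod : low.find? (fun p => pvCodCond p.2) with
  | none =>
    cases hnom : low.find? (fun p => pvNomCond p.2) with
    | none =>
      have h1 : (List.foldl pvA_f PySem.Dict.empty low).contains "codigo" = false := by
        rw [pvFoldl_contains _ _ "codigo" (by decide) (by decide)]; rfl
      simp only [h1, Bool.false_and, Bool.false_eq_true, if_false, Option.map_none]
    | some pn =>
      have h1 : (List.foldl pvA_f (PySem.Dict.empty.insert "nombre" pn.1) low).contains "codigo" = false := by
        rw [pvFoldl_contains _ _ "codigo" (by decide) (by decide)]; rfl
      simp only [h1, Bool.false_and, Bool.false_eq_true, if_false, Option.map_none]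
  | some pc =>
    cases hnom : low.find? (fun p => pvNomCond p.2) with
    | none =>
      have h2 : (List.foldl pvA_f (PySem.Dict.empty.insert "codigo" pc.1) low).contains "nombre" = false := by
        rw [pvFoldl_contains _ _ "nombre" (by decide) (by decide)]; rfl
      simp only [h2, Bool.and_false, Bool.false_eq_true, if_false, Option.map_none, Option.map_some]
    | some pn =>
      have hfull : List.foldl pvA_f ((PySem.Dict.empty.insert "codigo" pc.1).insert "nombre" pn.1) low
          = PySem.Dict.mk (("codigo", pc.1) :: ("nombre", pn.1)
              :: (List.foldl pvA_f PySem.Dict.empty low).items) := by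
        rw [show ((PySem.Dict.empty.insert "codigo" pc.1).insert "nombre" pn.1 : PySem.Dict String String)
            = PySem.Dict.mk (("codigo", pc.1) :: (PySem.Dict.mk [("nombre", pn.1)]).items) by
          simp [PySem.Dict.insert, PySem.Dict.contains, PySem.Dict.empty]]
        rw [pvFoldl_cons_key ("codigo", pc.1) rfl rfl]
        rw [show (PySem.Dict.mk [("nombre", pn.1)] : PySem.Dict String String)
            = PySem.Dict.mk (("nombre", pn.1) :: (PySem.Dict.empty : PySem.Dict String String).items) from rfl]
        rw [pvFoldl_cons_key ("nombre", pn.1) rfl rfl]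
      have htail := pvValorTail_pre columnas hpre
      rw [← hlow] at htail
      simp [hfull, pvFoldl_empty, htail, PySem.Dict.contains, PySem.Dict.items]
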